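-- pv_equiv track=rewrite | github.com/catalinac3/AdventOfCode | adventofcode/day8.py | calculateVisibleInnerTrees
-- ===== SOURCE A (Python) =====
-- def isVisible(data, row, col, organizedData):
--     treesLookingDown = [organizedData[i][col] for i in range(0, row)]
--     if max(treesLookingDown) < data:
--         # is visible looking down
--         return True
--
--
--     treesLookingUp = [organizedData[i][col] for i in range(row + 1, len(organizedData))]
--     if max(treesLookingUp) < data:
--         # is visible looking up
--         return True
--
--
--     treesLookingRight = [organizedData[row][j] for j in range(0,col)]
--     if max(treesLookingRight) < data:
--         # is visible looking right
--         return True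
--
--
--     treesLookingLeft = [organizedData[row][j] for j in range(col + 1, len(organizedData[0]))]
--     if max(treesLookingLeft) < data:
--         # is visible looking right
--         return True
--
--     return False
--
-- def calculateVisibleInnerTrees(organizedData):
--     startRow = 1
--     startColumn = 1
--     endRow = len(organizedData) - 1
--     endColumn = len(organizedData[0]) -1
--     visible = 0
--
--     # iterate through the inner trees
--     for i in range(startRow, endRow):
--         for j in range(startColumn, endColumn):
--             if isVisible(organizedData[i][j], i, j, organizedData):
--                 visible += 1
--     return visible
-- ===== SOURCE B (Python) =====
-- def prefix_maxes(xs):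
--     # out[k] = max(xs[:k]) for k >= 1 (out[0] is a placeholder, never read)
--     out = []
--     m = xs[0]
--     for x in xs:
--         out.append(m)
--         m = max(m, x)
--     return out
--
--
-- def calculateVisibleInnerTrees(organizedData):
--     g = organizedData
--     R = len(g)
--     C = len(g[0])
--     if R < 3 or C < 3:
--         return 0
--     cols = [[row[j] for row in g] for j in range(C)]
--     up = [prefix_maxes(col) for col in cols]                    # up[j][i]   = max of column j above row i
--     down = [prefix_maxes(col[::-1])[::-1] for col in cols]      # down[j][i] = max of column j below row i
--     visible = 0
--     for i in range(1, R - 1):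
--         row = g[i]
--         left = prefix_maxes(row)                                # left[j]  = max of row to the left of j
--         right = prefix_maxes(row[::-1])[::-1]                   # right[j] = max of row to the right of j
--         for j in range(1, C - 1):
--             h = row[j]
--             if h > up[j][i] or h > down[j][i] or h > left[j] or h > right[j]:
--                 visible += 1
--     return visible
-- ===== Notes on version B (the rewrite author's own statement) =====
-- stated objective: faster
-- what changed: Replaces the per-tree O(R+C) directional scans with four precomputed prefix/suffix-maxima tables (per column and per row), so each inner tree is tested in O(1).
-- outside the precondition, e.g. on calculateVisibleInnerTrees([[1, 2, 3], [3, 1, 0, 9], [1, 2, 3]]): A returns 1, B returns 0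
import Mathlib
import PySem

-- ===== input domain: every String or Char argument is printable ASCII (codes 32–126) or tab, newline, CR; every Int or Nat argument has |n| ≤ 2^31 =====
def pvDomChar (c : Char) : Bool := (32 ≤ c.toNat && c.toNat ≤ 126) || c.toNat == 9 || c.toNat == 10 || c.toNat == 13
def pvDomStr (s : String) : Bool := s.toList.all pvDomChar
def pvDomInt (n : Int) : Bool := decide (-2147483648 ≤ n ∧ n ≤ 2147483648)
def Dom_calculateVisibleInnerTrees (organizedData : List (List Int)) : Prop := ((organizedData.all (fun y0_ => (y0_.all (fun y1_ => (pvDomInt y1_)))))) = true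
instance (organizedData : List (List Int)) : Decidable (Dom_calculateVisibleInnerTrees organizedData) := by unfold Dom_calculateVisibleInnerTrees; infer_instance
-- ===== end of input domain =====

-- B replaces A's per-tree O(R+C) directional scans by four precomputed prefix/suffix-maxima
-- tables, one O(R*C) pass each, giving an O(1) visibility test per inner tree (objective: faster).

-- ===== PORT A =====
-- Python's max() raises ValueError on an empty list; here it is ported as
-- (PySem.List.max? … ).getD 0 — the default is never reached at A's call sites,
-- because row and col are strictly inner indices, so all four lists are nonempty.
def isVisible (data : Int) (row : Int) (col : Int) (organizedData : List (List Int)) : Bool :=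
  let treesLookingDown := (PySem.List.pyRange 0 row).map
    (fun i => PySem.List.pyGetD (PySem.List.pyGetD organizedData i []) col 0)
  if (PySem.List.max? treesLookingDown (fun y => y)).getD 0 < data then true
  else
    let treesLookingUp := (PySem.List.pyRange (row + 1) (PySem.List.len organizedData)).map
      (fun i => PySem.List.pyGetD (PySem.List.pyGetD organizedData i []) col 0)
    if (PySem.List.max? treesLookingUp (fun y => y)).getD 0 < data then true
    else
      let treesLookingRight := (PySem.List.pyRange 0 col).map
        (fun j => PySem.List.pyGetD (PySem.List.pyGetD organizedData row []) j 0)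
      if (PySem.List.max? treesLookingRight (fun y => y)).getD 0 < data then true
      else
        let treesLookingLeft := (PySem.List.pyRange (col + 1)
            (PySem.List.len (PySem.List.pyGetD organizedData 0 []))).map
          (fun j => PySem.List.pyGetD (PySem.List.pyGetD organizedData row []) j 0)
        if (PySem.List.max? treesLookingLeft (fun y => y)).getD 0 < data then true
        else false

def calculateVisibleInnerTrees (organizedData : List (List Int)) : Int :=
  let startRow : Int := 1
  let startColumn : Int := 1
  let endRow : Int := PySem.List.len organizedData - 1
  let endColumn : Int := PySem.List.len (PySem.List.pyGetD organizedData 0 []) - 1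
  (PySem.List.pyRange startRow endRow).foldl (fun visible i =>
    (PySem.List.pyRange startColumn endColumn).foldl (fun visible j =>
      if isVisible (PySem.List.pyGetD (PySem.List.pyGetD organizedData i []) j 0) i j organizedData
      then visible + 1 else visible) visible) 0

-- ===== PORT B =====
-- prefix_maxes(xs): out[k] = max(xs[:k]) for k >= 1 (out[0] is a placeholder, never read).
-- xs[0] raises IndexError on []; ported as pyGetD xs 0 0 — callers only pass nonempty rows/columns.
def prefixMaxes (xs : List Int) : List Int :=
  (xs.foldl (fun (st : List Int × Int) x => (st.1 ++ [st.2], max st.2 x))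
    (([] : List Int), PySem.List.pyGetD xs 0 0)).1

-- xs[::-1] is ported as .reverse (PySem.List.slice?_none_none_neg_one).
def calculateVisibleInnerTrees_alt (organizedData : List (List Int)) : Int :=
  let R : Int := PySem.List.len organizedData
  let C : Int := PySem.List.len (PySem.List.pyGetD organizedData 0 [])
  if R < 3 || C < 3 then 0
  else
    let cols := (PySem.List.pyRange 0 C).map
      (fun j => organizedData.map (fun row => PySem.List.pyGetD row j 0))
    let up := cols.map prefixMaxes
    let down := cols.map (fun col => (prefixMaxes col.reverse).reverse)
    (PySem.List.pyRange 1 (R - 1)).foldl (fun visible i =>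
      let row := PySem.List.pyGetD organizedData i []
      let left := prefixMaxes row
      let right := (prefixMaxes row.reverse).reverse
      (PySem.List.pyRange 1 (C - 1)).foldl (fun visible j =>
        let h := PySem.List.pyGetD row j 0
        if h > PySem.List.pyGetD (PySem.List.pyGetD up j []) i 0
           || h > PySem.List.pyGetD (PySem.List.pyGetD down j []) i 0
           || h > PySem.List.pyGetD left j 0
           || h > PySem.List.pyGetD right j 0
        then visible + 1 else visible) visible) 0

-- ===== PRECONDITION & SPEC =====
-- Pre_ admits nonempty grids that are either degenerate (fewer than 3 rows or columns: no
-- inner trees, both return 0) or RECTANGULAR — the function's natural domain.  It excludes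
-- the empty list (A raises IndexError) and non-degenerate ragged grids, on which A either
-- raises IndexError (a row too short) or silently ignores the part of a row extending past
-- row 0's width, while B's per-row passes read whole rows.  (See claim.json "cites".)
def Pre_calculateVisibleInnerTrees (organizedData : List (List Int)) : Prop :=
  organizedData ≠ [] ∧
  (organizedData.length < 3 ∨ (organizedData.headD []).length < 3 ∨
    ∀ r ∈ organizedData, r.length = (organizedData.headD []).length)
instance (organizedData : List (List Int)) : Decidable (Pre_calculateVisibleInnerTrees organizedData) := by unfold Pre_calculateVisibleInnerTrees; infer_instance

def pvWitness_calculateVisibleInnerTrees : List (List Int) :=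
  [[3, 0, 3, 7, 3], [2, 5, 5, 1, 2], [6, 5, 3, 3, 2], [3, 3, 5, 4, 9], [3, 5, 3, 9, 0]]

def Spec_calculateVisibleInnerTrees (organizedData : List (List Int)) (out : Int) : Prop := out = calculateVisibleInnerTrees_alt organizedData
instance (organizedData : List (List Int)) (out : Int) : Decidable (Spec_calculateVisibleInnerTrees organizedData out) := by unfold Spec_calculateVisibleInnerTrees; infer_instance

-- ===== CLAIM (what is proved, stated in full; the proofs are below) =====
def Claim_equal_calculateVisibleInnerTrees : Prop := ∀ (organizedData : List (List Int)), Dom_calculateVisibleInnerTrees organizedData → Pre_calculateVisibleInnerTrees organizedData → Spec_calculateVisibleInnerTrees organizedData (calculateVisibleInnerTrees organizedData)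

-- ===== LEMMAS AND PROOFS =====

-- the recursive shape of prefix_maxes' loop
def pvGo (m : Int) : List Int → List Int
  | [] => []
  | x :: xs => m :: pvGo (max m x) xs

theorem pvGo_foldl (xs : List Int) : ∀ (acc : List Int) (m : Int),
    (xs.foldl (fun (st : List Int × Int) x => (st.1 ++ [st.2], max st.2 x)) (acc, m)).1
      = acc ++ pvGo m xs := by
  induction xs with
  | nil => intro acc m; simp [pvGo]
  | cons x xs ih => intro acc m; simp [pvGo, ih]

theorem prefixMaxes_eq_pvGo (xs : List Int) :
    prefixMaxes xs = pvGo (PySem.List.pyGetD xs 0 0) xs := by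
  simp [prefixMaxes, pvGo_foldl]

theorem pvGo_length (xs : List Int) : ∀ m : Int, (pvGo m xs).length = xs.length := by
  induction xs with
  | nil => intro m; simp [pvGo]
  | cons x xs ih => intro m; simp [pvGo, ih]

theorem pvGo_getD (xs : List Int) : ∀ (m : Int) (k : Nat), k < xs.length →
    (pvGo m xs).getD k 0 = (xs.take k).foldl max m := by
  induction xs with
  | nil => intro m k h; simp at h
  | cons x xs ih =>
    intro m k h
    cases k with
    | zero => simp [pvGo]
    | succ k => simp only [pvGo, List.getD_cons_succ, List.take_succ_cons, List.foldl_cons]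
                exact ih (max m x) k (by simpa using h)

theorem pv_foldl_max_swap (t : List Int) : ∀ a x : Int,
    t.foldl max (max a x) = max (t.foldl max a) x := by
  induction t with
  | nil => intro a x; simp
  | cons y t ih =>
    intro a x
    simp only [List.foldl_cons]
    rw [show max (max a x) y = max (max a y) x by
          rcases le_total a x with h | h <;> rcases le_total a y with h' | h' <;>
            rcases le_total x y with h'' | h'' <;> simp [max_def] <;> omega,
        ih]

theorem pv_foldl_max_reverse (t : List Int) : ∀ a : Int,
    t.reverse.foldl max a = t.foldl max a := by
  induction t with
  | nil => intro a; simp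
  | cons x t ih =>
    intro a
    simp only [List.reverse_cons, List.foldl_append, List.foldl_cons, List.foldl_nil, ih]
    rw [← pv_foldl_max_swap]

-- running max of a nonempty list, as Python's max() computes it
def pvFmax (l : List Int) : Int := l.tail.foldl max (l.headD 0)

theorem pvFmax_cons (x : Int) (t : List Int) : pvFmax (x :: t) = t.foldl max x := by
  simp [pvFmax]

theorem pv_max?_eq (l : List Int) (h : l ≠ []) :
    (PySem.List.max? l (fun y => y)).getD 0 = pvFmax l := by
  cases l with
  | nil => exact absurd rfl h
  | cons x t => rw [PySem.List.max?_id_cons, pvFmax_cons]; rfl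

theorem pvFmax_reverse (l : List Int) : pvFmax l.reverse = pvFmax l := by
  cases l with
  | nil => rfl
  | cons x t =>
    cases ht : t.reverse with
    | nil => simp_all
    | cons y s =>
      have hl : (x :: t).reverse = y :: (s ++ [x]) := by simp [ht]
      rw [hl, pvFmax_cons, pvFmax_cons]
      have : t = s.reverse ++ [y] := by
        have := congrArg List.reverse ht; simpa using this
      subst this
      simp only [List.foldl_append, List.foldl_cons, List.foldl_nil]
      rw [pv_foldl_max_reverse]
      rw [← pv_foldl_max_swap s y x, ← pv_foldl_max_swap s x y, max_comm y x]

-- B's prefix table read at index k ≥ 1 is the max of the first k elements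
theorem prefixMaxes_getD (l : List Int) (k : Nat) (h1 : 1 ≤ k) (h2 : k < l.length) :
    (prefixMaxes l).getD k 0 = pvFmax (l.take k) := by
  cases l with
  | nil => simp at h2
  | cons x t =>
    rw [prefixMaxes_eq_pvGo]
    rw [pvGo_getD _ _ _ h2]
    cases k with
    | zero => omega
    | succ k =>
      simp only [List.take_succ_cons, List.foldl_cons, pvFmax_cons]
      simp [PySem.List.pyGetD]

-- B's suffix table read at index k (k+1 < |l|) is the max of the elements after k
theorem suffixMaxes_getD (l : List Int) (k : Nat) (h2 : k + 1 < l.length) :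
    ((prefixMaxes l.reverse).reverse).getD k 0 = pvFmax (l.drop (k + 1)) := by
  have hlen : (prefixMaxes l.reverse).length = l.length := by
    rw [prefixMaxes_eq_pvGo, pvGo_length, List.length_reverse]
  have hk : k < ((prefixMaxes l.reverse).reverse).length := by
    rw [List.length_reverse, hlen]; omega
  rw [List.getD_eq_getElem _ _ hk, List.getElem_reverse, ← List.getD_eq_getElem _ 0]
  rw [hlen]
  rw [prefixMaxes_getD _ _ (by omega) (by rw [List.length_reverse]; omega)]
  have h1 : (l.reverse.take (l.length - 1 - k)).reverse = l.drop (k + 1) := by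
    rw [List.reverse_take]
    simp only [List.length_reverse, List.reverse_reverse]
    congr 1
    omega
  have htake : l.reverse.take (l.length - 1 - k) = (l.drop (k + 1)).reverse := by
    rw [← h1, List.reverse_reverse]
  rw [htake, pvFmax_reverse]

-- [f 0, …, f (n-1)] with f k = l.getD k d is l.take n
theorem pv_map_range_getD (l : List Int) (n : Nat) (h : n ≤ l.length) :
    (List.range n).map (fun k => l.getD k 0) = l.take n := by
  apply List.ext_getElem
  · simp; omega
  · intro i h1 h2
    simp only [List.getElem_map, List.getElem_range, List.getElem_take]
    exact List.getD_eq_getElem _ _ _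


-- A-side list [l[k] for k in range(0, n)] is l.take n
theorem pv_takeA (l : List Int) (n : Nat) (h : n ≤ l.length) :
    (PySem.List.pyRange 0 (n : Int)).map (fun k => PySem.List.pyGetD l k 0) = l.take n := by
  rw [PySem.List.pyRange_zero_nat, List.map_map]
  have hf : ((fun k => PySem.List.pyGetD l k 0) ∘ (fun k : Nat => (k : Int)))
      = fun k : Nat => l.getD k 0 := by
    funext k; simp [PySem.List.pyGetD_natCast]
  rw [hf, pv_map_range_getD _ _ h]

-- A-side column prefix [g[k][jN] for k in range(0, iN)] is (column jN).take iN
theorem pv_colTakeA (g : List (List Int)) (iN jN : Nat) (h : iN ≤ g.length) :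
    (PySem.List.pyRange 0 (iN : Int)).map
        (fun i' => PySem.List.pyGetD (PySem.List.pyGetD g i' []) (jN : Int) 0)
      = (g.map (fun r => r.getD jN 0)).take iN := by
  rw [PySem.List.pyRange_zero_nat, List.map_map]
  have hf : ((fun i' => PySem.List.pyGetD (PySem.List.pyGetD g i' []) (jN : Int) 0)
        ∘ (fun k : Nat => (k : Int)))
      = fun k : Nat => (g.getD k []).getD jN 0 := by
    funext k; simp [PySem.List.pyGetD_natCast]
  rw [hf]
  have hcong : ∀ k ∈ List.range iN,
      (g.getD k []).getD jN 0 = (g.map (fun r => r.getD jN 0)).getD k 0 := by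
    intro k hk
    rw [List.mem_range] at hk
    have hk' : k < g.length := lt_of_lt_of_le hk h
    rw [List.getD_eq_getElem (g.map (fun r => r.getD jN 0)) 0 (by simpa using hk'),
        List.getElem_map, List.getD_eq_getElem g ([] : List Int) hk']
  rw [List.map_congr_left hcong, pv_map_range_getD _ _ (by simpa using h)]

-- A-side column suffix [g[k][jN] for k in range(iN+1, len(g))] is (column jN).drop (iN+1)
theorem pv_colDropA (g : List (List Int)) (iN jN : Nat) :
    (PySem.List.pyRange ((iN : Int) + 1) (PySem.List.len g)).map
        (fun i' => PySem.List.pyGetD (PySem.List.pyGetD g i' []) (jN : Int) 0)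
      = (g.map (fun r => r.getD jN 0)).drop (iN + 1) := by
  have hsplit : (fun i' => PySem.List.pyGetD (PySem.List.pyGetD g i' ([] : List Int)) (jN : Int) 0)
      = (fun r => PySem.List.pyGetD r (jN : Int) 0) ∘ (fun i' => PySem.List.pyGetD g i' ([] : List Int)) := rfl
  rw [hsplit, ← List.map_map, PySem.List.map_pyGetD_pyRange g ([] : List Int) (by omega)]
  have ht : ((iN : Int) + 1).toNat = iN + 1 := by omega
  rw [ht, ← List.map_drop]
  simp [PySem.List.pyGetD_natCast]

-- A row suffix [l[k] for k in range(jN+1, len l)] is l.drop (jN+1)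
theorem pv_dropA (l : List Int) (jN : Nat) :
    (PySem.List.pyRange ((jN : Int) + 1) (PySem.List.len l)).map
        (fun k => PySem.List.pyGetD l k 0)
      = l.drop (jN + 1) := by
  rw [PySem.List.map_pyGetD_pyRange l 0 (by omega)]
  congr 1

-- an if/elif chain of four boolean tests is their disjunction
theorem pv_ite_or (c1 c2 c3 c4 : Prop) [Decidable c1] [Decidable c2] [Decidable c3] [Decidable c4] :
    (if c1 then true else if c2 then true else if c3 then true else if c4 then true else false)
      = (decide c1 || decide c2 || decide c3 || decide c4) := by
  by_cases h1 : c1 <;> by_cases h2 : c2 <;> by_cases h3 : c3 <;> by_cases h4 : c4 <;>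
    simp [h1, h2, h3, h4]

-- per-cell equality: A's four directional scans = B's four table reads
theorem pv_cell (g : List (List Int)) (hg : g ≠ [])
    (hrect : ∀ r ∈ g, r.length = (g.headD []).length)
    (iN jN : Nat) (hi1 : 1 ≤ iN) (hi2 : iN + 1 < g.length)
    (hj1 : 1 ≤ jN) (hj2 : jN + 1 < (g.headD []).length) :
    isVisible ((g.getD iN []).getD jN 0) (iN : Int) (jN : Int) g
      = (decide ((g.getD iN []).getD jN 0 > (prefixMaxes (g.map (fun r => r.getD jN 0))).getD iN 0)
        || decide ((g.getD iN []).getD jN 0 > ((prefixMaxes (g.map (fun r => r.getD jN 0)).reverse).reverse).getD iN 0)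
        || decide ((g.getD iN []).getD jN 0 > (prefixMaxes (g.getD iN [])).getD jN 0)
        || decide ((g.getD iN []).getD jN 0 > ((prefixMaxes (g.getD iN []).reverse).reverse).getD jN 0)) := by
  have hrow : (g.getD iN []).length = (g.headD []).length := by
    apply hrect
    rw [List.getD_eq_getElem g ([] : List Int) (by omega : iN < g.length)]
    exact List.getElem_mem _
  have hcollen : (g.map (fun r => r.getD jN 0)).length = g.length := by simp
  -- the tree height under test
  set data : Int := (g.getD iN []).getD jN 0 with hdata
  -- direction 1: rows above
  have hc1 : (PySem.List.max? ((PySem.List.pyRange 0 (iN : Int)).map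
        (fun i' => PySem.List.pyGetD (PySem.List.pyGetD g i' []) (jN : Int) 0)) (fun y => y)).getD 0
      = (prefixMaxes (g.map (fun r => r.getD jN 0))).getD iN 0 := by
    rw [pv_colTakeA g iN jN (by omega),
        pv_max?_eq _ (by
          apply List.ne_nil_of_length_pos
          rw [List.length_take]
          omega),
        ← prefixMaxes_getD _ _ hi1 (by omega)]
  -- direction 2: rows below
  have hc2 : (PySem.List.max? ((PySem.List.pyRange ((iN : Int) + 1) (PySem.List.len g)).map
        (fun i' => PySem.List.pyGetD (PySem.List.pyGetD g i' []) (jN : Int) 0)) (fun y => y)).getD 0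
      = ((prefixMaxes (g.map (fun r => r.getD jN 0)).reverse).reverse).getD iN 0 := by
    rw [pv_colDropA g iN jN,
        pv_max?_eq _ (by
          apply List.ne_nil_of_length_pos
          rw [List.length_drop]
          omega),
        ← suffixMaxes_getD _ _ (by omega)]
  -- direction 3: row to the left
  have hc3 : (PySem.List.max? ((PySem.List.pyRange 0 (jN : Int)).map
        (fun j' => PySem.List.pyGetD (PySem.List.pyGetD g (iN : Int) []) j' 0)) (fun y => y)).getD 0
      = (prefixMaxes (g.getD iN [])).getD jN 0 := by
    have hrw : PySem.List.pyGetD g (iN : Int) ([] : List Int) = g.getD iN [] := by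
      simp [PySem.List.pyGetD_natCast]
    rw [hrw, pv_takeA _ jN (by omega),
        pv_max?_eq _ (by
          apply List.ne_nil_of_length_pos
          rw [List.length_take]
          omega),
        ← prefixMaxes_getD _ _ hj1 (by omega)]
  -- direction 4: row to the right (A reads len(g[0]), which equals len(row) on a rectangular grid)
  have hc4 : (PySem.List.max? ((PySem.List.pyRange ((jN : Int) + 1)
        (PySem.List.len (PySem.List.pyGetD g 0 []))).map
        (fun j' => PySem.List.pyGetD (PySem.List.pyGetD g (iN : Int) []) j' 0)) (fun y => y)).getD 0
      = ((prefixMaxes (g.getD iN []).reverse).reverse).getD jN 0 := by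
    have hrw : PySem.List.pyGetD g (iN : Int) ([] : List Int) = g.getD iN [] := by
      simp [PySem.List.pyGetD_natCast]
    have hlen0 : PySem.List.len (PySem.List.pyGetD g 0 []) = PySem.List.len (g.getD iN []) := by
      rw [PySem.List.pyGetD_zero, PySem.List.len_eq, PySem.List.len_eq, hrow]
      cases g with
      | nil => exact absurd rfl hg
      | cons r0 rest => simp
    rw [hrw, hlen0, pv_dropA _ jN,
        pv_max?_eq _ (by
          apply List.ne_nil_of_length_pos
          rw [List.length_drop]
          omega),
        ← suffixMaxes_getD _ _ (by omega)]
  simp only [isVisible]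
  rw [hc1, hc2, hc3, hc4, pv_ite_or]

set_option maxHeartbeats 1000000 in
theorem pv_main (organizedData : List (List Int))
    (hpre : Pre_calculateVisibleInnerTrees organizedData) :
    calculateVisibleInnerTrees organizedData = calculateVisibleInnerTrees_alt organizedData := by
  obtain ⟨hne, hcase⟩ := hpre
  have hhead : organizedData.getD 0 [] = organizedData.headD [] := by
    cases organizedData with
    | nil => rfl
    | cons r0 rest => rfl
  unfold calculateVisibleInnerTrees calculateVisibleInnerTrees_alt
  dsimp only
  split
  case isTrue hguard =>
    simp only [Bool.or_eq_true, decide_eq_true_eq, PySem.List.len_eq] at hguard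
    rcases hguard with hR | hC
    · rw [show PySem.List.pyRange 1 (PySem.List.len organizedData - 1) = [] from
        PySem.List.pyRange_one_eq_nil (by rw [PySem.List.len_eq]; omega)]
      simp
    · rw [PySem.List.pyRange_one_eq_nil
        (by simp only [PySem.List.pyGetD_zero, PySem.List.len_eq] at hC ⊢; omega)]
      simp only [List.foldl_nil]
      exact List.foldl_fixed _
  case isFalse hguard =>
    simp only [Bool.or_eq_true, decide_eq_true_eq, PySem.List.len_eq, not_or, not_lt] at hguard
    obtain ⟨hR, hC⟩ := hguard
    have hC' : 3 ≤ ((organizedData.headD []).length : Int) := by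
      rw [← hhead, ← PySem.List.pyGetD_zero]
      exact hC
    have hrect : ∀ r ∈ organizedData, r.length = (organizedData.headD []).length := by
      rcases hcase with h | h | h
      · omega
      · omega
      · exact h
    have hClen : PySem.List.len (PySem.List.pyGetD organizedData 0 [])
        = ((organizedData.headD []).length : Int) := by
      rw [PySem.List.pyGetD_zero, hhead, PySem.List.len_eq]
    apply PySem.List.foldl_congr_mem
    intro acc i hi
    rw [PySem.List.mem_pyRange_one, PySem.List.len_eq] at hi
    obtain ⟨iN, rfl⟩ : ∃ n : Nat, i = (n : Int) :=
      ⟨i.toNat, (Int.toNat_of_nonneg (by omega)).symm⟩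
    apply PySem.List.foldl_congr_mem
    intro acc' j hj
    rw [PySem.List.mem_pyRange_one, hClen] at hj
    obtain ⟨jN, rfl⟩ : ∃ n : Nat, j = (n : Int) :=
      ⟨j.toNat, (Int.toNat_of_nonneg (by omega)).symm⟩
    have hiN : iN + 1 < organizedData.length := by omega
    have hjN : jN + 1 < (organizedData.headD []).length := by omega
    -- reduce B's table reads to getD form
    have hup : PySem.List.pyGetD
        (((PySem.List.pyRange 0 (PySem.List.len (PySem.List.pyGetD organizedData 0 []))).map
          (fun j => organizedData.map (fun row => PySem.List.pyGetD row j 0))).map prefixMaxes)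
        (jN : Int) []
        = prefixMaxes (organizedData.map (fun r => r.getD jN 0)) := by
      rw [hClen, List.map_map,
        PySem.List.pyGetD_map_pyRange_of_nonneg _ _ (jN : Int) [] (by omega) (by omega)]
      simp [PySem.List.pyGetD_natCast, Function.comp]
    have hdown : PySem.List.pyGetD
        (((PySem.List.pyRange 0 (PySem.List.len (PySem.List.pyGetD organizedData 0 []))).map
          (fun j => organizedData.map (fun row => PySem.List.pyGetD row j 0))).map
          (fun col => (prefixMaxes col.reverse).reverse))
        (jN : Int) []
        = (prefixMaxes (organizedData.map (fun r => r.getD jN 0)).reverse).reverse := by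
      rw [hClen, List.map_map,
        PySem.List.pyGetD_map_pyRange_of_nonneg _ _ (jN : Int) [] (by omega) (by omega)]
      simp [PySem.List.pyGetD_natCast, Function.comp]
    rw [hup, hdown]
    simp only [PySem.List.pyGetD_natCast]
    rw [pv_cell organizedData hne hrect iN jN (by omega) hiN (by omega) hjN]

-- ===== VERDICT (by name: the statement is the Claim_ definition above) =====
theorem calculateVisibleInnerTrees_spec : Claim_equal_calculateVisibleInnerTrees := by
  intro g _ hpre
  unfold Spec_calculateVisibleInnerTrees
  exact pv_main g hpre
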